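-- pv_equiv track=rewrite | github.com/Tokoku69/aulaDaAudrey | luiz2.py | preenche_vetor
-- ===== SOURCE A (Python) =====
-- def preenche_vetor(valor_inicial):
--     """
--     Essa função aceita um valor inteiro inicial e cria um vetor de tamanho 10.
--     O primeiro elemento do vetor é o valor inicial e cada elemento subsequente é o dobro do valor do elemento anterior.
--
--     Args:
--     valor_inicial (int): o valor para a primeira posição do vetor.
--
--     Returns:
--     list of str: uma lista de strings que representam a saída formatada.
--     """
--     # Criação do vetor com 10 posições
--     N = [0] * 10
--
--     # Definição do primeiro valor do vetor
--     N[0] = valor_inicial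
--
--     # Preenchendo o vetor com o dobro do valor da posição anterior
--     for i in range(1, 10):
--         N[i] = N[i - 1] * 2
--
--     # Criando a saída formatada
--     resultado = []
--     for i in range(10):
--         resultado.append(f"N[{i}] = {N[i]}")
--
--     return resultado
-- ===== SOURCE B (Python) =====
-- def preenche_vetor(valor_inicial):
--     # single pass, closed form: element i is valor_inicial * 2**i
--     return [f"N[{i}] = {valor_inicial * 2**i}" for i in range(10)]
-- ===== Notes on version B (the rewrite author's own statement) =====
-- stated objective: idiomatic
-- what changed: Replaces the two-pass build-then-format (mutable array filled by the doubling recurrence, then a second formatting loop) with a single comprehension computing each string directly from the closed form: element i is the initial value times the i-th power of two.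
import Mathlib
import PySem

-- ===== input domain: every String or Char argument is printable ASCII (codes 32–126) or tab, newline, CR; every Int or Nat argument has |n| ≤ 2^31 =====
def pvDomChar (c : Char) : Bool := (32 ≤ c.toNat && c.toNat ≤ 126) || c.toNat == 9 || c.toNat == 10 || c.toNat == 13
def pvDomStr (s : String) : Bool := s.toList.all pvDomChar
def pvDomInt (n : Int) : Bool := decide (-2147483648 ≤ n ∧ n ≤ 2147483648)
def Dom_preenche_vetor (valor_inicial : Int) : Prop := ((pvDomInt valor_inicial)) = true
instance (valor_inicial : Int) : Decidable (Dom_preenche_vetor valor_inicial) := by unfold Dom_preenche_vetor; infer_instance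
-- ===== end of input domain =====

-- B replaces the two-pass build-then-format with a single pass using the closed form valor_inicial * 2^i (objective: idiomatic).
-- ===== PORT A =====
def preenche_vetor (valor_inicial : Int) : List String :=
  let N : List Int := List.replicate 10 0
  let N := PySem.List.pySetD N 0 valor_inicial
  let N := (PySem.List.pyRange 1 10 1).foldl
    (fun N i => PySem.List.pySetD N i (PySem.List.pyGetD N (i - 1) 0 * 2)) N
  (PySem.List.pyRange 0 10 1).foldl
    (fun acc i => acc ++ ["N[" ++ PySem.Int.toStr i ++ "] = " ++ PySem.Int.toStr (PySem.List.pyGetD N i 0)]) []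

-- ===== PORT B =====
def preenche_vetor_alt (valor_inicial : Int) : List String :=
  (PySem.List.pyRange 0 10 1).map
    (fun i => "N[" ++ PySem.Int.toStr i ++ "] = " ++ PySem.Int.toStr (valor_inicial * 2 ^ i.toNat))

-- ===== PRECONDITION & SPEC =====
def Spec_preenche_vetor (valor_inicial : Int) (out : List String) : Prop := out = preenche_vetor_alt valor_inicial
instance (valor_inicial : Int) (out : List String) : Decidable (Spec_preenche_vetor valor_inicial out) := by unfold Spec_preenche_vetor; infer_instance

-- ===== CLAIM (what is proved, stated in full; the proofs are below) =====
def Claim_equal_preenche_vetor : Prop := ∀ (valor_inicial : Int), Dom_preenche_vetor valor_inicial → Spec_preenche_vetor valor_inicial (preenche_vetor valor_inicial)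

-- ===== LEMMAS AND PROOFS =====

-- ===== VERDICT (by name: the statement is the Claim_ definition above) =====
set_option maxHeartbeats 2000000 in
theorem preenche_vetor_spec : Claim_equal_preenche_vetor := by
  intro v _
  unfold Spec_preenche_vetor preenche_vetor preenche_vetor_alt
  simp only [PySem.List.pyRange_one]
  norm_num [List.range_succ, PySem.List.pySetD, PySem.List.pySet?, PySem.List.pyGetD,
    PySem.List.pyIdx?, PySem.List.pyGet?, Int.toNat, List.replicate, List.set]
  ring_nf
  simp
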